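-- pv_equiv track=rewrite | github.com/8080509/Permutation-Generators | SymmetricGroups3.py | getPV
-- ===== SOURCE A (Python) =====
-- def getPV(x):
-- 	"""Returns the pinnacle and vale set of the given permutation."""
-- 	edge = float('inf')
-- 	x = [*x]
-- 	x.append(edge)
-- 	P = set()
-- 	V = set()
-- 	preV = x.pop(0)
-- 	preD = True
-- 	for j in x:
-- 		newD = preV > j
-- 		if (not preD) and newD:
-- 			P.add(preV)
-- 		elif preD and (not newD):
-- 			V.add(preV)
-- 		preV = j
-- 		preD = newD
-- 	return P, V
-- ===== SOURCE B (Python) =====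
-- def getPV(x):
-- 	"""Returns the pinnacle and vale set of the given permutation."""
-- 	inf = float('inf')
-- 	b = [inf, *x, inf]
-- 	# stage 1: split the padded sequence into maximal weakly-ascending runs
-- 	runs = []
-- 	cur = [b[0]]
-- 	for v in b[1:]:
-- 		if cur[-1] <= v:
-- 			cur.append(v)
-- 		else:
-- 			runs.append(cur)
-- 			cur = [v]
-- 	runs.append(cur)
-- 	# stage 2: pinnacles are the tops of the ascending runs, vales their starts
-- 	P = {r[-1] for r in runs[:-1] if len(r) >= 2}
-- 	V = {r[0] for r in runs[1:] if len(r) >= 2}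
-- 	return P, V
-- ===== Notes on version B (the rewrite author's own statement) =====
-- stated objective: alternative
-- what changed: Replaces A's one-pass scan with carried state (preV value and preD descent flag, adding elements as the flag flips) by a two-stage algorithm: first split the inf-padded sequence into maximal weakly-ascending runs, then read the pinnacles off as the tops of the non-final runs and the vales as the starts of the non-initial runs (runs of length 1 contribute nothing).
import Mathlib
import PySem

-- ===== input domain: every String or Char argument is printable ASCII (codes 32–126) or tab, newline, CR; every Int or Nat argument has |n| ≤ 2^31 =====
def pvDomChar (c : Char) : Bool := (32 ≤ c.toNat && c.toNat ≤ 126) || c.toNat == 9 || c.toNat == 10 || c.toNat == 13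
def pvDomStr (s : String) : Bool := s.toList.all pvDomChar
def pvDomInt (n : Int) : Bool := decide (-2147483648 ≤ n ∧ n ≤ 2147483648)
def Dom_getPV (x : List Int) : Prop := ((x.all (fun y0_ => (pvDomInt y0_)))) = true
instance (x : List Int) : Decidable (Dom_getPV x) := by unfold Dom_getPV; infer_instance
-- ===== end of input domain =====

-- B replaces A's single carried-state scan (preV/preD) by a two-stage algorithm: first
-- split the inf-padded sequence into maximal weakly-ascending runs, then read the
-- pinnacles off as the tops of those runs and the vales as their starts
-- (objective: alternative decomposition; same O(n) cost).
-- float('inf') is modelled exactly as `none : Option Int` (greater than every int); it is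
-- only ever compared, never returned, so the modelling is exact on all int lists.

-- ===== PORT A =====
-- `a > b` on values that may be float('inf') (none = inf); exact since inf > every int.
def pvGT (a b : Option Int) : Bool :=
  match a, b with
  | none, none => false
  | none, some _ => true
  | some _, none => false
  | some a, some b => decide (a > b)

-- set.add of a possibly-inf value; a none is never actually added by either program
-- (inf never satisfies the add conditions), defined as no-op for totality.
def pvAddO (s : PySem.Set Int) (v : Option Int) : PySem.Set Int :=
  match v with
  | some v => PySem.Set.add s v
  | none => s

-- A's `for j in x` loop, as the obvious structural recursion over the same state.
def getPV_loop (P V : PySem.Set Int) (preV : Option Int) (preD : Bool) :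
    List (Option Int) → PySem.Set Int × PySem.Set Int
  | [] => (P, V)
  | j :: js =>
    let newD := pvGT preV j
    if !preD && newD then getPV_loop (pvAddO P preV) V j newD js
    else if preD && !newD then getPV_loop P (pvAddO V preV) j newD js
    else getPV_loop P V j newD js

def getPV (x : List Int) : List Int × List Int :=
  -- x = [*x]; x.append(inf); preV = x.pop(0); preD = True; loop
  match x.map Option.some ++ [none] with
  | [] => (PySem.Set.empty, PySem.Set.empty)  -- unreachable: the list ends with none
  | preV :: rest => getPV_loop PySem.Set.empty PySem.Set.empty preV true rest

-- ===== PORT B =====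
-- `a <= b` with none = inf.
def pvLE (a b : Option Int) : Bool :=
  match a, b with
  | none, none => true
  | none, some _ => false
  | some _, none => true
  | some a, some b => decide (a ≤ b)

-- Python's l[-1] / l[0] on the (always nonempty) runs and current run: exact there.
def pvLast (l : List (Option Int)) : Option Int := l.getLastD none
def pvHead (l : List (Option Int)) : Option Int := l.headD none

-- B's stage-1 loop: split into maximal weakly-ascending runs.  `cur` is never empty
-- (it starts as [b[0]] and is only ever appended to or reset to [v]).
def runsLoop (runs : List (List (Option Int))) (cur : List (Option Int)) :
    List (Option Int) → List (List (Option Int))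
  | [] => runs ++ [cur]
  | v :: vs =>
    if pvLE (pvLast cur) v then runsLoop runs (cur ++ [v]) vs
    else runsLoop (runs ++ [cur]) [v] vs

-- B's stage-2 set comprehensions.
def pvAddPinn (P : PySem.Set Int) (r : List (Option Int)) : PySem.Set Int :=
  if 2 ≤ r.length then pvAddO P (pvLast r) else P

def pvAddVale (V : PySem.Set Int) (r : List (Option Int)) : PySem.Set Int :=
  if 2 ≤ r.length then pvAddO V (pvHead r) else V

def getPV_alt (x : List Int) : List Int × List Int :=
  -- b = [inf, *x, inf]; cur = [b[0]]; loop over b[1:]; runs.append(cur) at the end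
  let runs := runsLoop [] [none] (x.map Option.some ++ [none])
  -- P = {r[-1] for r in runs[:-1] if len(r) >= 2}; V = {r[0] for r in runs[1:] if len(r) >= 2}
  (runs.dropLast.foldl pvAddPinn PySem.Set.empty,
   runs.tail.foldl pvAddVale PySem.Set.empty)

-- ===== PRECONDITION & SPEC =====
def Spec_getPV (x : List Int) (out : List Int × List Int) : Prop := out = getPV_alt x
instance (x : List Int) (out : List Int × List Int) : Decidable (Spec_getPV x out) := by unfold Spec_getPV; infer_instance

-- ===== CLAIM (what is proved, stated in full; the proofs are below) =====
def Claim_equal_getPV : Prop := ∀ (x : List Int), Dom_getPV x → Spec_getPV x (getPV x)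

-- ===== LEMMAS AND PROOFS =====

theorem pvLE_eq_not_pvGT (a b : Option Int) : pvLE a b = !pvGT a b := by
  cases a <;> cases b <;> simp only [pvLE, pvGT, ← decide_not, decide_eq_decide] <;> first | rfl | omega

theorem pvAddO_idem (s : PySem.Set Int) (v : Option Int) :
    pvAddO (pvAddO s v) v = pvAddO s v := by
  cases v with
  | none => rfl
  | some a => exact PySem.Set.add_of_mem (by simp [pvAddO, PySem.Set.mem_add])

theorem pvAddO_none (s : PySem.Set Int) : pvAddO s none = s := rfl

theorem pvLast_singleton (v : Option Int) : pvLast [v] = v := rfl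

theorem pvLast_append_singleton (l : List (Option Int)) (v : Option Int) :
    pvLast (l ++ [v]) = v := by
  simp [pvLast, List.getLastD_eq_getLast?, List.getLast?_append]

theorem pvLast_append_cons (l : List (Option Int)) (v : Option Int) (vs : List (Option Int)) :
    pvLast (l ++ v :: vs) = pvLast (v :: vs) := by
  simp only [pvLast, List.getLastD_eq_getLast?, List.getLast?_append]
  cases h : (v :: vs).getLast? with
  | none => exact absurd h (by simp)
  | some a => rfl

theorem pvHead_cons (a : Option Int) (l : List (Option Int)) : pvHead (a :: l) = a := rfl

theorem pvHead_append (l l' : List (Option Int)) (h : l ≠ []) :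
    pvHead (l ++ l') = pvHead l := by
  cases l with
  | nil => exact absurd rfl h
  | cons a t => rfl

-- the runs accumulator is only ever appended to
theorem runsLoop_acc (rest : List (Option Int)) : ∀ (runs : List (List (Option Int))) (cur : List (Option Int)),
    runsLoop runs cur rest = runs ++ runsLoop [] cur rest := by
  induction rest with
  | nil => intro runs cur; simp only [runsLoop, List.nil_append]
  | cons v vs ih =>
    intro runs cur
    simp only [runsLoop]
    split
    · conv_rhs => rw [ih]
      rw [ih runs, List.nil_append]
    · conv_rhs => rw [ih]
      rw [ih (runs ++ [cur])]
      simp [List.append_assoc]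

-- the first run extends the initial cur
theorem runsLoop_first (rest : List (Option Int)) : ∀ (cur : List (Option Int)),
    ∃ t more, runsLoop [] cur rest = (cur ++ t) :: more := by
  induction rest with
  | nil => intro cur; exact ⟨[], [], by simp only [runsLoop, List.nil_append, List.append_nil]⟩
  | cons v vs ih =>
    intro cur
    simp only [runsLoop]
    split
    · obtain ⟨t, more, h⟩ := ih (cur ++ [v])
      exact ⟨[v] ++ t, more, by simpa [List.append_assoc] using h⟩
    · exact ⟨[], runsLoop [] [v] vs, by rw [runsLoop_acc]; simp⟩

-- the last run ends with the last element of the whole (cur ++ rest) sequence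
theorem runsLoop_last (rest : List (Option Int)) : ∀ (cur : List (Option Int)),
    ∃ init r, runsLoop [] cur rest = init ++ [r] ∧
      pvLast r = pvLast (cur ++ rest) := by
  induction rest with
  | nil => intro cur; exact ⟨[], cur, by simp only [runsLoop, List.nil_append], by simp⟩
  | cons v vs ih =>
    intro cur
    simp only [runsLoop]
    split
    · obtain ⟨init, r, h, hl⟩ := ih (cur ++ [v])
      refine ⟨init, r, h, ?_⟩
      rw [hl, List.append_assoc, List.singleton_append]
    · obtain ⟨init, r, h, hl⟩ := ih [v]
      refine ⟨[cur] ++ init, r, ?_, ?_⟩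
      · rw [runsLoop_acc, h]; simp
      · rw [hl, List.singleton_append, pvLast_append_cons]

-- Main invariant: A's scan from state (P, V, cur[-1], len(cur)==1) equals B's
-- run decomposition continued from the current run cur, folded into the same accumulators.
theorem main_inv (rest : List (Option Int)) : ∀ (cur : List (Option Int)) (P V : PySem.Set Int),
    cur ≠ [] →
    (2 ≤ cur.length → pvAddVale V cur = V) →
    pvLast (cur ++ rest) = none →
    getPV_loop P V (pvLast cur) (cur.length == 1) rest
      = ((runsLoop [] cur rest).foldl pvAddPinn P,
         (runsLoop [] cur rest).foldl pvAddVale V) := by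
  induction rest with
  | nil =>
    intro cur P V hne hV hlast
    simp only [List.append_nil] at hlast
    simp only [getPV_loop, runsLoop, List.nil_append, List.foldl_cons, List.foldl_nil,
      Prod.mk.injEq]
    constructor
    · simp [pvAddPinn, hlast, pvAddO_none]
    · by_cases h2 : 2 ≤ cur.length
      · rw [hV h2]
      · simp [pvAddVale, h2]
  | cons v vs ih =>
    intro cur P V hne hV hlast
    have hlen0 : cur.length ≠ 0 := by simpa [List.length_eq_zero_iff] using hne
    by_cases h1 : cur.length = 1
    · -- preD = true (cur is a fresh run of length 1)
      have hD : (cur.length == 1) = true := by simp [h1]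
      obtain ⟨a, rfl⟩ := List.length_eq_one_iff.mp h1
      by_cases hGT : pvGT (pvLast [a]) v = true
      · -- descent: A adds nothing (preD ∧ newD); B closes the length-1 run (no contribution)
        simp only [getPV_loop, runsLoop, pvLE_eq_not_pvGT, hGT, hD, Bool.not_true,
          Bool.false_and, Bool.and_false, Bool.true_and, if_false, Bool.false_eq_true,
          ite_false]
        have hlast' : pvLast ([v] ++ vs) = none := by
          rw [List.singleton_append]; rw [pvLast_append_cons] at hlast; exact hlast
        have h := ih [v] P V (by simp) (by simp [pvAddVale]) hlast'
        rw [runsLoop_acc]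
        simp only [List.foldl_append, List.nil_append, List.foldl_cons, List.foldl_nil]
        have hP : pvAddPinn P [a] = P := by simp [pvAddPinn]
        have hVa : pvAddVale V [a] = V := by simp [pvAddVale]
        rw [hP, hVa]
        exact h
      · -- ascent: A records the vale a; absorbed by the extended run's head
        have hGTf : pvGT (pvLast [a]) v = false := by
          cases hx : pvGT (pvLast [a]) v; rfl; exact absurd hx hGT
        simp only [getPV_loop, runsLoop, pvLE_eq_not_pvGT, hGTf, hD, Bool.not_true,
          Bool.not_false, Bool.false_and, Bool.and_false, Bool.true_and, Bool.and_true,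
          if_false, Bool.false_eq_true, ite_false, if_true, ite_true]
        rw [pvLast_singleton]
        have hlast' : pvLast (([a] ++ [v]) ++ vs) = none := by
          rw [List.append_assoc, List.singleton_append]; exact hlast
        have hlen' : (([a] ++ [v]).length == 1) = false := by simp
        have hV' : 2 ≤ ([a] ++ [v]).length → pvAddVale (pvAddO V a) ([a] ++ [v])
            = pvAddO V a := by
          intro _
          simp only [pvAddVale, List.singleton_append, pvHead_cons]
          rw [if_pos (by simp)]
          exact pvAddO_idem V a
        have h := ih ([a] ++ [v]) P (pvAddO V a) (by simp) hV' hlast'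
        rw [pvLast_append_singleton, hlen'] at h
        rw [h]
        obtain ⟨t, more, hfr⟩ := runsLoop_first vs ([a] ++ [v])
        rw [hfr]
        simp only [List.foldl_cons]
        have hhd : pvHead (([a] ++ [v]) ++ t) = a := by
          rw [pvHead_append _ _ (by simp)]; rfl
        have e : ∀ (W : PySem.Set Int), pvAddVale W (([a] ++ [v]) ++ t) = pvAddO W a := by
          intro W
          simp only [pvAddVale, hhd]
          rw [if_pos (by simp only [List.length_append, List.length_cons,
            List.length_nil]; omega)]
        rw [e, e, pvAddO_idem]
    · -- preD = false (the current run has length ≥ 2)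
      have hD : (cur.length == 1) = false := by simp [h1]
      have h2 : 2 ≤ cur.length := by omega
      by_cases hGT : pvGT (pvLast cur) v = true
      · -- descent: A adds the pinnacle cur[-1]; B closes the run with the same top
        simp only [getPV_loop, runsLoop, pvLE_eq_not_pvGT, hGT, hD, Bool.not_true,
          Bool.not_false, Bool.true_and, Bool.and_true, if_true, ite_true, if_false,
          Bool.false_eq_true, ite_false]
        have hlast' : pvLast ([v] ++ vs) = none := by
          rw [List.singleton_append]; rw [pvLast_append_cons] at hlast; exact hlast
        have h := ih [v] (pvAddO P (pvLast cur)) V (by simp) (by simp [pvAddVale]) hlast'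
        rw [runsLoop_acc]
        simp only [List.foldl_append, List.nil_append, List.foldl_cons, List.foldl_nil]
        have hP : pvAddPinn P cur = pvAddO P (pvLast cur) := by
          simp only [pvAddPinn]; rw [if_pos h2]
        rw [hP, hV h2]
        exact h
      · -- ascent: nothing recorded; B extends the run, head unchanged
        have hGTf : pvGT (pvLast cur) v = false := by
          cases hx : pvGT (pvLast cur) v; rfl; exact absurd hx hGT
        simp only [getPV_loop, runsLoop, pvLE_eq_not_pvGT, hGTf, hD, Bool.not_false,
          Bool.and_false, Bool.false_and, if_true, ite_true, if_false, Bool.false_eq_true,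
          ite_false]
        have hlast' : pvLast ((cur ++ [v]) ++ vs) = none := by
          rw [List.append_assoc, List.singleton_append]; exact hlast
        have hlen' : ((cur ++ [v]).length == 1) = false := by
          rw [beq_eq_false_iff_ne]
          simp only [List.length_append, List.length_cons, List.length_nil]
          omega
        have hV' : 2 ≤ (cur ++ [v]).length → pvAddVale V (cur ++ [v]) = V := by
          intro _
          have hold := hV h2
          simp only [pvAddVale] at hold
          rw [if_pos h2] at hold
          simp only [pvAddVale]
          rw [if_pos (by simp only [List.length_append, List.length_cons,
            List.length_nil]; omega), pvHead_append _ _ hne]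
          exact hold
        have h := ih (cur ++ [v]) P V (by simp) hV' hlast'
        rw [pvLast_append_singleton, hlen'] at h
        exact h

-- A's port equals the loop started from the virtual left pad (cur = [inf])
theorem getPV_eq_padded (x : List Int) :
    getPV x = getPV_loop PySem.Set.empty PySem.Set.empty none true
      (x.map Option.some ++ [none]) := by
  cases x with
  | nil => rfl
  | cons h t =>
    simp only [getPV, List.map_cons, List.cons_append]
    simp [getPV_loop, pvGT]

-- ===== VERDICT (by name: the statement is the Claim_ definition above) =====
theorem getPV_spec : Claim_equal_getPV := by
  intro x _
  show getPV x = getPV_alt x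
  rw [getPV_eq_padded]
  have hlast0 : pvLast ([none] ++ (x.map Option.some ++ [none])) = none := by
    rw [← List.append_assoc]; exact pvLast_append_singleton _ _
  have hmain := main_inv (x.map Option.some ++ [none]) [none]
    PySem.Set.empty PySem.Set.empty (by simp) (by simp [pvAddVale]) hlast0
  have e1 : pvLast [none] = none := rfl
  have e2 : (([none] : List (Option Int)).length == 1) = true := rfl
  rw [e1, e2] at hmain
  rw [hmain]
  simp only [getPV_alt, Prod.mk.injEq]
  obtain ⟨init, r, hsplit, hlastr⟩ := runsLoop_last (x.map Option.some ++ [none]) [none]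
  obtain ⟨t, more, hfirst⟩ := runsLoop_first (x.map Option.some ++ [none]) [none]
  constructor
  · -- P: the final run ends with the right pad inf and contributes nothing
    rw [hsplit, List.dropLast_concat, List.foldl_append]
    simp only [List.foldl_cons, List.foldl_nil]
    have hr : pvLast r = none := by rw [hlastr]; exact hlast0
    simp [pvAddPinn, hr, pvAddO_none]
  · -- V: the first run starts with the left pad inf and contributes nothing
    rw [hfirst]
    have hv0 : pvAddVale PySem.Set.empty ([none] ++ t) = PySem.Set.empty := by
      simp only [pvAddVale, List.singleton_append, pvHead_cons, pvAddO_none, ite_self]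
    rw [List.tail_cons, List.foldl_cons, hv0]
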